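-- pv_equiv track=rewrite | github.com/dakone22/riscv-lab-pipeline-generator | parsing/tabular_list.py | word_positions
-- ===== SOURCE A (Python) =====
-- def word_positions(input_string):
--     words = input_string.split()
--     positions = {}
--     start = 0
--
--     for word in words:
--         word_len = len(word)
--         end = input_string.find(word, start)
--         positions[end + word_len - 1] = word
--         start = end + word_len
--
--     return positions
-- ===== SOURCE B (Python) =====
-- def word_positions(input_string):
--     positions = {}
--     cur = []
--     for i, c in enumerate(input_string):
--         if c.isspace():
--             if cur:
--                 positions[i - 1] = ''.join(cur)
--                 cur = []
--         else:
--             cur.append(c)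
--     if cur:
--         positions[len(input_string) - 1] = ''.join(cur)
--     return positions
-- ===== Notes on version B (the rewrite author's own statement) =====
-- stated objective: alternative
-- what changed: Replaced split()-then-repeated-find() (two phases with substring search to recover each word's position) by a single left-to-right scan that accumulates each run of non-whitespace characters and records (index of its last character, word) directly.
import Mathlib
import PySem

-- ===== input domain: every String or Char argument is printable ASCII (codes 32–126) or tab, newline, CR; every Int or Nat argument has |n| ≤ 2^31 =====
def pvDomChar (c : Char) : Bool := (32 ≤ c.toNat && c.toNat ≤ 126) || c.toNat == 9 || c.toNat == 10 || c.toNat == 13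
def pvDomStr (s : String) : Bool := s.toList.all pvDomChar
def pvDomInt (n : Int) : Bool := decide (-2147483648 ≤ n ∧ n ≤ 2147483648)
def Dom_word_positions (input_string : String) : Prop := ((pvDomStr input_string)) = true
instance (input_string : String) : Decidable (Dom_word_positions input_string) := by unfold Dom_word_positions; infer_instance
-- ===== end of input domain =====

-- B replaces A's split()-then-find() two-phase algorithm by a single left-to-right scan that
-- accumulates each run of non-whitespace characters and records (index of its last char, word);
-- objective: alternative (one pass, no substring search; return-value equivalence proved below).

-- ===== PORT A =====
-- A: words = s.split(); for each word, end = s.find(word, start); positions[end+len-1] = word; start = end+len.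
def word_positions (input_string : String) : List (Int × String) :=
  let words := PySem.Str.split₀ input_string
  let st :=
    words.foldl
      (fun (st : PySem.Dict Int String × Int) word =>
        let word_len := PySem.Str.len word
        let e := PySem.Str.findFrom input_string word st.2
        (st.1.insert (e + word_len - 1) word, e + word_len))
      (PySem.Dict.empty, 0)
  st.1.items

-- ===== PORT B =====
-- B: one scan; i = current index, cur = current run of non-whitespace chars (in order).
def wordScan (i : Int) (cur : List Char) : List Char → List (Int × String)
  | [] => if cur.isEmpty then [] else [(i - 1, String.ofList cur)]
  | c :: rest =>
    if PySem.Chars.isspace c then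
      if cur.isEmpty then wordScan (i + 1) [] rest
      else (i - 1, String.ofList cur) :: wordScan (i + 1) [] rest
    else wordScan (i + 1) (cur ++ [c]) rest

def word_positions_alt (input_string : String) : List (Int × String) :=
  wordScan 0 [] input_string.toList

-- ===== PRECONDITION & SPEC =====
def Spec_word_positions (input_string : String) (out : List (Int × String)) : Prop := out = word_positions_alt input_string
instance (input_string : String) (out : List (Int × String)) : Decidable (Spec_word_positions input_string out) := by unfold Spec_word_positions; infer_instance

-- ===== CLAIM (what is proved, stated in full; the proofs are below) =====
def Claim_equal_word_positions : Prop := ∀ (input_string : String), Dom_word_positions input_string → Spec_word_positions input_string (word_positions input_string)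

-- ===== LEMMAS AND PROOFS =====

-- split₀.go accumulator lemma
theorem split_go_acc (cs : List Char) : ∀ (cur : List Char) (acc : List (List Char)),
    PySem.Chars.split₀.go cs cur acc = acc.reverse ++ PySem.Chars.split₀.go cs cur [] := by
  induction cs with
  | nil =>
    intro cur acc
    simp [PySem.Chars.split₀.go]
    split <;> simp
  | cons c rest ih =>
    intro cur acc
    simp only [PySem.Chars.split₀.go]
    split
    · split
      · exact ih [] acc
      · rw [ih [] (cur.reverse :: acc), ih [] [cur.reverse]]
        simp
    · exact ih (c :: cur) acc

theorem split_space (c : Char) (r : List Char) (h : PySem.Chars.isspace c = true) :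
    PySem.Chars.split₀ (c :: r) = PySem.Chars.split₀ r := by
  simp [PySem.Chars.split₀, PySem.Chars.split₀.go, h]

theorem split_all_space (t : List Char) (h : ∀ c ∈ t, PySem.Chars.isspace c = true) :
    PySem.Chars.split₀ t = [] := by
  induction t with
  | nil => simp [PySem.Chars.split₀, PySem.Chars.split₀.go]
  | cons c r ih =>
    rw [split_space c r (h c (by simp))]
    exact ih (fun x hx => h x (by simp [hx]))

theorem split_spaces (sp : List Char) (h : ∀ c ∈ sp, PySem.Chars.isspace c = true) :
    ∀ x : List Char, PySem.Chars.split₀ (sp ++ x) = PySem.Chars.split₀ x := by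
  induction sp with
  | nil => intro x; simp
  | cons c sp' ih =>
    intro x
    rw [List.cons_append, split_space c (sp' ++ x) (h c (by simp))]
    exact ih (fun y hy => h y (by simp [hy])) x

theorem split_go_word (w : List Char) (hw : ∀ c ∈ w, PySem.Chars.isspace c = false) :
    ∀ (r cur : List Char) (acc : List (List Char)),
    PySem.Chars.split₀.go (w ++ r) cur acc = PySem.Chars.split₀.go r (w.reverse ++ cur) acc := by
  induction w with
  | nil => intro r cur acc; simp
  | cons c w' ih =>
    intro r cur acc
    simp only [List.cons_append, PySem.Chars.split₀.go, hw c (by simp)]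
    rw [ih (fun x hx => hw x (by simp [hx])) r (c :: cur) acc]
    simp

theorem split_word (w r : List Char) (hw : ∀ c ∈ w, PySem.Chars.isspace c = false)
    (hne : w ≠ []) (hr : r = [] ∨ ∃ c r', r = c :: r' ∧ PySem.Chars.isspace c = true) :
    PySem.Chars.split₀ (w ++ r) = w :: PySem.Chars.split₀ r := by
  show PySem.Chars.split₀.go (w ++ r) [] [] = w :: PySem.Chars.split₀ r
  rw [split_go_word w hw r [] []]
  rcases hr with rfl | ⟨c, r', rfl, hc⟩
  · simp [PySem.Chars.split₀, PySem.Chars.split₀.go, hne]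
  · rw [split_space c r' hc, List.append_nil]
    have h1 : w.reverse.isEmpty = false := by simp [hne]
    simp only [PySem.Chars.split₀.go, hc, h1, if_true, Bool.false_eq_true, if_false,
      List.reverse_reverse]
    rw [split_go_acc r' [] [w]]
    rfl

-- wordScan lemmas
theorem wordScan_spaces (sp : List Char) (h : ∀ c ∈ sp, PySem.Chars.isspace c = true) :
    ∀ (i : Int) (t : List Char), wordScan i [] (sp ++ t) = wordScan (i + sp.length) [] t := by
  induction sp with
  | nil => intro i t; simp
  | cons c sp' ih =>
    intro i t
    simp only [List.cons_append, wordScan, h c (by simp), if_pos, List.isEmpty_nil, if_true]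
    rw [ih (fun x hx => h x (by simp [hx])) (i + 1) t]
    congr 1
    simp only [List.length_cons]
    push_cast; ring

theorem wordScan_word (w : List Char) (hw : ∀ c ∈ w, PySem.Chars.isspace c = false) :
    ∀ (i : Int) (cur t : List Char),
    wordScan i cur (w ++ t) = wordScan (i + w.length) (cur ++ w) t := by
  induction w with
  | nil => intro i cur t; simp
  | cons c w' ih =>
    intro i cur t
    simp only [List.cons_append, wordScan, hw c (by simp)]
    rw [ih (fun x hx => hw x (by simp [hx])) (i + 1) (cur ++ [c]) t]
    rw [show cur ++ [c] ++ w' = cur ++ c :: w' by simp]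
    rw [show i + 1 + (w'.length : Int) = i + ((c :: w').length : Nat) by
      simp only [List.length_cons]; omega]
    simp

theorem wordScan_emit (i : Int) (cur t : List Char) (hne : cur ≠ [])
    (ht : t = [] ∨ ∃ c t', t = c :: t' ∧ PySem.Chars.isspace c = true) :
    wordScan i cur t = (i - 1, String.ofList cur) :: wordScan i [] t := by
  rcases ht with rfl | ⟨c, t', rfl, hc⟩
  · simp [wordScan, hne]
  · simp [wordScan, hc, hne]

theorem wordScan_all_space (t : List Char) (h : ∀ c ∈ t, PySem.Chars.isspace c = true) :
    ∀ i : Int, wordScan i [] t = [] := by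
  induction t with
  | nil => intro i; simp [wordScan]
  | cons c r ih =>
    intro i
    simp only [wordScan, h c (by simp), if_pos, List.isEmpty_nil, if_true]
    exact ih (fun x hx => h x (by simp [hx])) (i + 1)

-- find of the first word in sp ++ w ++ r
theorem find_first_word (sp w r : List Char)
    (hsp : ∀ c ∈ sp, PySem.Chars.isspace c = true)
    (hw : ∀ c ∈ w, PySem.Chars.isspace c = false) (hne : w ≠ []) :
    PySem.Chars.find (sp ++ w ++ r) w = (sp.length : Int) := by
  have hocc : w <+: (sp ++ w ++ r).drop sp.length := by
    rw [List.append_assoc, List.drop_left]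
    exact ⟨r, rfl⟩
  have hno : ∀ i < sp.length, ¬ w <+: (sp ++ w ++ r).drop i := by
    intro i hi hpre
    have hd : (sp ++ w ++ r).drop i = sp[i] :: (sp.drop (i+1) ++ (w ++ r)) := by
      rw [List.append_assoc, List.drop_append_of_le_length (Nat.le_of_lt hi),
        List.drop_eq_getElem_cons hi, List.cons_append]
    obtain ⟨c₀, w', rfl⟩ := List.exists_cons_of_ne_nil hne
    rw [hd, List.cons_prefix_cons] at hpre
    have h1 := hsp sp[i] (by simp)
    have h2 := hw c₀ (by simp)
    rw [← hpre.1] at h1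
    rw [h1] at h2
    exact absurd h2 (by simp)
  have hnn : 0 ≤ PySem.Chars.find (sp ++ w ++ r) w := by
    rw [PySem.Chars.find_nonneg_iff]
    exact ⟨sp, r, by rw [List.append_assoc]⟩
  obtain ⟨hp, hmin⟩ := PySem.Chars.find_spec hnn
  have heq : (PySem.Chars.find (sp ++ w ++ r) w).toNat = sp.length := by
    rcases Nat.lt_trichotomy (PySem.Chars.find (sp ++ w ++ r) w).toNat sp.length with h | h | h
    · exact absurd hp (hno _ h)
    · exact h
    · exact absurd hocc (hmin _ h)
  omega

-- main invariant lemma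
theorem main_loop (cs : List Char) : ∀ (n k : Nat) (d : PySem.Dict Int String),
    cs.length - k = n → k ≤ cs.length →
    (∀ p ∈ d.items, p.1 < (k : Int)) →
    (((PySem.Chars.split₀ (cs.drop k)).map String.ofList).foldl
      (fun (st : PySem.Dict Int String × Int) word =>
        (st.1.insert (PySem.Chars.findFrom cs word.toList st.2 none + (word.toList.length : Int) - 1) word,
         PySem.Chars.findFrom cs word.toList st.2 none + (word.toList.length : Int)))
      (d, (k : Int))).1.items
    = d.items ++ wordScan (k : Int) [] (cs.drop k) := by
  intro n
  induction n using Nat.strong_induction_on with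
  | _ n ih =>
    intro k d hn hk hkeys
    set t := cs.drop k with ht
    by_cases hall : ∀ c ∈ t, PySem.Chars.isspace c = true
    · rw [split_all_space t hall, wordScan_all_space t hall]
      simp
    · -- decompose t = sp ++ w ++ r : leading spaces, first word, remainder
      have hune : t.dropWhile PySem.Chars.isspace ≠ [] := by
        intro h0; exact hall (List.dropWhile_eq_nil_iff.mp h0)
      set sp := t.takeWhile PySem.Chars.isspace with hspdef
      set u := t.dropWhile PySem.Chars.isspace with hudef
      set w := u.takeWhile (fun c => !PySem.Chars.isspace c) with hwdef
      set r := u.dropWhile (fun c => !PySem.Chars.isspace c) with hrdef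
      have hspall : ∀ c ∈ sp, PySem.Chars.isspace c = true :=
        fun c hc => List.mem_takeWhile_imp hc
      have hwall : ∀ c ∈ w, PySem.Chars.isspace c = false := by
        intro c hc
        have := List.mem_takeWhile_imp hc
        simpa using this
      have hhead : PySem.Chars.isspace (u.head hune) = false :=
        List.head_dropWhile_not PySem.Chars.isspace hune
      have hwne : w ≠ [] := by
        obtain ⟨c₀, u', huc⟩ := List.exists_cons_of_ne_nil hune
        rw [hwdef, huc]
        have hc₀ : PySem.Chars.isspace c₀ = false := by
          have h1 := hhead
          simp only [huc, List.head_cons] at h1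
          exact h1
        simp [List.takeWhile_cons, hc₀]
      have hrgood : r = [] ∨ ∃ c r'', r = c :: r'' ∧ PySem.Chars.isspace c = true := by
        rcases hr : r with _ | ⟨c, r''⟩
        · exact Or.inl rfl
        · refine Or.inr ⟨c, r'', rfl, ?_⟩
          have hrne : u.dropWhile (fun c => !PySem.Chars.isspace c) ≠ [] := by
            rw [← hrdef, hr]; simp
          have h2 := List.head_dropWhile_not (fun c => !PySem.Chars.isspace c) hrne
          simp only [← hrdef, hr, List.head_cons] at h2
          simpa using h2
      have huw : w ++ r = u := List.takeWhile_append_dropWhile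
      have htsp : sp ++ u = t := List.takeWhile_append_dropWhile
      have ht2 : t = sp ++ w ++ r := by rw [List.append_assoc, huw, htsp]
      have hlent : t.length = cs.length - k := by rw [ht]; simp
      have hlen : sp.length + w.length + r.length = t.length := by
        rw [ht2]; simp; omega
      have hwpos : 1 ≤ w.length := by
        rcases hwx : w with _ | _
        · exact absurd hwx hwne
        · simp
      have hk'le : k + sp.length + w.length ≤ cs.length := by omega
      have hdropk' : cs.drop (k + sp.length + w.length) = r := by
        rw [← List.drop_drop, ← List.drop_drop, ← ht, ht2, List.append_assoc,
          List.drop_left, List.drop_left]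
      have hfind : PySem.Chars.find t w = (sp.length : Int) := by
        rw [ht2]; exact find_first_word sp w r hspall hwall hwne
      have hfindFrom : PySem.Chars.findFrom cs w (k : Int) none = (k : Int) + sp.length := by
        rw [PySem.Chars.findFrom_natCast cs w k hk, ← ht, hfind]
        rw [if_neg (by omega)]
      have hsplit : PySem.Chars.split₀ t = w :: PySem.Chars.split₀ r := by
        rw [ht2, List.append_assoc, split_spaces sp hspall (w ++ r)]
        exact split_word w r hwall hwne hrgood
      have hcast : (k : Int) + sp.length + w.length = ((k + sp.length + w.length : Nat) : Int) := by
        push_cast; ring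
      have hscan : wordScan (k : Int) [] t
          = (((k + sp.length + w.length : Nat) : Int) - 1, String.ofList w)
            :: wordScan ((k + sp.length + w.length : Nat) : Int) [] r := by
        rw [ht2, List.append_assoc, wordScan_spaces sp hspall (k : Int) (w ++ r),
          wordScan_word w hwall ((k : Int) + sp.length) [] r, List.nil_append]
        rw [wordScan_emit ((k : Int) + sp.length + w.length) w r hwne hrgood]
        rw [hcast]
      have hcont : d.contains (((k + sp.length + w.length : Nat) : Int) - 1) = false := by
        by_contra hcb
        rw [Bool.not_eq_false, PySem.Dict.contains_iff_mem_keys] at hcb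
        simp only [PySem.Dict.keys] at hcb
        obtain ⟨p, hp, hpe⟩ := List.mem_map.mp hcb
        have hlt := hkeys p hp
        rw [hpe] at hlt
        have : ((k + sp.length + w.length : Nat) : Int) = (k : Int) + sp.length + w.length := by
          push_cast; ring
        omega
      have hitems := PySem.Dict.items_insert_of_not_contains d (String.ofList w) hcont
      have hkeys' : ∀ p ∈ (d.insert (((k + sp.length + w.length : Nat) : Int) - 1)
          (String.ofList w)).items, p.1 < ((k + sp.length + w.length : Nat) : Int) := by
        intro p hp
        rw [hitems] at hp
        rcases List.mem_append.mp hp with hp | hp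
        · have := hkeys p hp
          have hle : (k : Int) ≤ ((k + sp.length + w.length : Nat) : Int) := by
            push_cast; omega
          omega
        · have hpe := List.mem_singleton.mp hp
          subst hpe
          simp
      have hih := ih (cs.length - (k + sp.length + w.length)) (by omega)
        (k + sp.length + w.length)
        (d.insert (((k + sp.length + w.length : Nat) : Int) - 1) (String.ofList w))
        rfl hk'le hkeys'
      rw [hdropk'] at hih
      rw [hsplit, List.map_cons, List.foldl_cons]
      simp only [String.toList_ofList, hfindFrom]
      rw [hcast, hih, hitems, hscan]
      simp
-- ===== VERDICT (by name: the statement is the Claim_ definition above) =====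
theorem word_positions_spec : Claim_equal_word_positions := by
  intro s _
  show word_positions s = word_positions_alt s
  unfold word_positions word_positions_alt
  have hws : PySem.Str.split₀ s = (PySem.Chars.split₀ s.toList).map String.ofList := by
    rw [← PySem.Str.split₀_map_toList, List.map_map]
    simp [Function.comp_def]
  have hfun : (fun (st : PySem.Dict Int String × Int) word =>
        (st.1.insert (PySem.Str.findFrom s word st.2 + PySem.Str.len word - 1) word,
         PySem.Str.findFrom s word st.2 + PySem.Str.len word))
      = (fun (st : PySem.Dict Int String × Int) word =>
        (st.1.insert (PySem.Chars.findFrom s.toList word.toList st.2 none + (word.toList.length : Int) - 1) word,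
         PySem.Chars.findFrom s.toList word.toList st.2 none + (word.toList.length : Int))) := by
    funext st word
    simp [PySem.Str.findFrom_eq, PySem.Str.len]
  have hmain := main_loop s.toList s.toList.length 0 PySem.Dict.empty (by simp) (by simp)
    (by intro p hp; simp [PySem.Dict.empty] at hp)
  simp only [List.drop_zero, Nat.cast_zero] at hmain
  simp only [hws, hfun]
  rw [hmain]
  simp [PySem.Dict.empty]
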